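-- pv_equiv track=rewrite | github.com/angus4718/stable-portfolio-compression | scripts/visualize_path_betweeness.py | subtree_accumulation_snapshots
-- ===== SOURCE A (Python) =====
-- from typing import Dict, List, Tuple, Any
--
-- def subtree_accumulation_snapshots(
--     adj: Dict[Any, List[Tuple[Any, float]]], parent: Dict[Any, Any], order: List[Any]
-- ):
--     """Simulate the reverse-DFS subtree accumulation and capture a snapshot after processing each node.
--
--     Returns list of (processed_node, snapshot_subtree_dict_copy)
--     """
--     nodes = list(adj.keys())
--     # initialize subtree sizes to 1
--     subtree = {u: 1 for u in nodes}
--     snapshots = []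
--     # process in reversed discovery order (children before parent)
--     for u in reversed(order):
--         # accumulate sizes of children
--         for v, _ in adj[u]:
--             if parent.get(v) == u:
--                 subtree[u] += subtree[v]
--         snapshots.append((u, subtree.copy()))
--     return snapshots
-- ===== SOURCE B (Python) =====
-- def subtree_accumulation_snapshots(adj, parent, order):
--     # Two-phase: run the accumulation once to its FINAL state, then reconstruct the
--     # snapshots newest-first by undoing one step at a time (each undo subtracts the
--     # child-sum, which is recomputable because a step never changes its children's
--     # entries), and reverse the collected list at the end.
--     cur = {u: 1 for u in adj}
--     for u in reversed(order):
--         cur[u] += sum(cur[v] for v, _ in adj[u] if parent.get(v) == u)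
--     rev = []
--     for u in order:
--         rev.append((u, dict(cur)))
--         cur[u] -= sum(cur[v] for v, _ in adj[u] if parent.get(v) == u)
--     rev.reverse()
--     return rev
-- ===== Notes on version B (the rewrite author's own statement) =====
-- stated objective: alternative
-- what changed: B replaces A's snapshot-as-you-go loop (mutate one dict, copy it after each step) by a two-phase inversion: it first runs the accumulation once to its final state, then reconstructs the snapshots newest-first by undoing one step at a time (subtracting the recomputed child-sum) and reverses the collected list.
import Mathlib
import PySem

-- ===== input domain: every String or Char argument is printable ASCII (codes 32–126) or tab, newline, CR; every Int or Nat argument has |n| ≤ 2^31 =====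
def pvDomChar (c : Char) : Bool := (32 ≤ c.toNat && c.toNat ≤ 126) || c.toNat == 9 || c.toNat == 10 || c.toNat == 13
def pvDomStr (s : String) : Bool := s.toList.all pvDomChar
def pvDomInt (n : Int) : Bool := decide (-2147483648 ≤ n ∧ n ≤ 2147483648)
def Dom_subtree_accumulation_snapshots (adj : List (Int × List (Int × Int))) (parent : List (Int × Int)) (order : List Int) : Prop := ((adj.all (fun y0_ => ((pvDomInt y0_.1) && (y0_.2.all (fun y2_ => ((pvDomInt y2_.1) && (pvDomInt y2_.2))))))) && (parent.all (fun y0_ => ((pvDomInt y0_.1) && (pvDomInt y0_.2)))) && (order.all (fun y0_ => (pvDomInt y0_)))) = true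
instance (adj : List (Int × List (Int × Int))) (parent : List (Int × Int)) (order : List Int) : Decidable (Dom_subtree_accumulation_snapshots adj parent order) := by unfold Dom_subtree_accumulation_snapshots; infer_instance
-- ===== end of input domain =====

-- B computes snapshots by running the accumulation to its final state and then undoing
-- the steps one at a time, collecting snapshots newest-first and reversing at the end.

-- ===== PORT A =====
def subtree_accumulation_snapshots (adj : List (Int × List (Int × Int))) (parent : List (Int × Int)) (order : List Int) : List (Int × (List (Int × Int))) :=
  let adjD := PySem.Dict.ofList adj
  let parentD := PySem.Dict.ofList parent
  let nodes := adjD.keys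
  let subtree := nodes.foldl (fun d u => d.insert u (1 : Int)) PySem.Dict.empty
  -- adj[u] / subtree[v] raise KeyError when the key is missing: Pre_ excludes that; getD stands in
  let res := order.reverse.foldl
    (fun (st : PySem.Dict Int Int × List (Int × List (Int × Int))) u =>
      let d := (adjD.getD u []).foldl
        (fun d p => if parentD.get? p.1 == some u then d.insert u (d.getD u 0 + d.getD p.1 0) else d) st.1
      (d, st.2 ++ [(u, d.items)])) (subtree, [])
  res.2

-- ===== PORT B =====
def subtree_accumulation_snapshots_alt (adj : List (Int × List (Int × Int))) (parent : List (Int × Int)) (order : List Int) : List (Int × (List (Int × Int))) :=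
  let adjD := PySem.Dict.ofList adj
  let parentD := PySem.Dict.ofList parent
  -- pass 1: fold the accumulation to its final state
  let cur0 := adjD.keys.foldl (fun d u => d.insert u (1 : Int)) PySem.Dict.empty
  -- adj[u] / cur[v] raise KeyError when the key is missing: Pre_ excludes that; getD stands in
  let cur1 := order.reverse.foldl
    (fun (d : PySem.Dict Int Int) u =>
      d.insert u (d.getD u 0 + (((adjD.getD u []).filter (fun q => parentD.get? q.1 == some u)).map (fun q => d.getD q.1 0)).sum)) cur0
  -- pass 2: snapshot, then undo one step, walking the order forward (newest snapshot first)
  let res := order.foldl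
    (fun (st : PySem.Dict Int Int × List (Int × List (Int × Int))) u =>
      (st.1.insert u (st.1.getD u 0 - (((adjD.getD u []).filter (fun q => parentD.get? q.1 == some u)).map (fun q => st.1.getD q.1 0)).sum),
       st.2 ++ [(u, st.1.items)])) (cur1, [])
  res.2.reverse

-- ===== PRECONDITION & SPEC =====
-- Pre_ excludes (a) orders containing a node missing from adj, and parent-linked children missing
-- from adj, where A raises KeyError; and (b) orders visiting a node that adj lists among its own
-- parent-linked children (a self-loop with parent[u] == u), a degenerate corner where A's value
-- comes from reading the partially updated accumulator subtree[u] mid-loop and B adds one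
-- pre-step child-sum — both values are accidental, no tree input reaches this.
def Pre_subtree_accumulation_snapshots (adj : List (Int × List (Int × Int))) (parent : List (Int × Int)) (order : List Int) : Prop :=
  ∀ u ∈ order, (PySem.Dict.ofList adj).contains u = true ∧
    ∀ p ∈ (PySem.Dict.ofList adj).getD u ([] : List (Int × Int)),
      (PySem.Dict.ofList parent).get? p.1 = some u →
        (PySem.Dict.ofList adj).contains p.1 = true ∧ p.1 ≠ u
instance (adj : List (Int × List (Int × Int))) (parent : List (Int × Int)) (order : List Int) : Decidable (Pre_subtree_accumulation_snapshots adj parent order) := by unfold Pre_subtree_accumulation_snapshots; infer_instance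

def pvWitness_subtree_accumulation_snapshots : (List (Int × List (Int × Int))) × (List (Int × Int)) × List Int :=
  ([(0, [(1, 5)]), (1, [])], [(1, 0)], [0, 1])

def Spec_subtree_accumulation_snapshots (adj : List (Int × List (Int × Int))) (parent : List (Int × Int)) (order : List Int) (out : List (Int × (List (Int × Int)))) : Prop := out = subtree_accumulation_snapshots_alt adj parent order
instance (adj : List (Int × List (Int × Int))) (parent : List (Int × Int)) (order : List Int) (out : List (Int × (List (Int × Int)))) : Decidable (Spec_subtree_accumulation_snapshots adj parent order out) := by unfold Spec_subtree_accumulation_snapshots; infer_instance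

-- ===== CLAIM (what is proved, stated in full; the proofs are below) =====
def Claim_equal_subtree_accumulation_snapshots : Prop := ∀ (adj : List (Int × List (Int × Int))) (parent : List (Int × Int)) (order : List Int), Dom_subtree_accumulation_snapshots adj parent order → Pre_subtree_accumulation_snapshots adj parent order → Spec_subtree_accumulation_snapshots adj parent order (subtree_accumulation_snapshots adj parent order)

-- ===== LEMMAS AND PROOFS =====

-- the child-sum, the one-step update, the multi-step fold, and the snapshot trace
def pvInc (adjD : PySem.Dict Int (List (Int × Int))) (parentD : PySem.Dict Int Int) (d : PySem.Dict Int Int) (u : Int) : Int :=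
  (((adjD.getD u []).filter (fun q => parentD.get? q.1 == some u)).map (fun q => d.getD q.1 0)).sum

def pvS (adjD : PySem.Dict Int (List (Int × Int))) (parentD : PySem.Dict Int Int) (d : PySem.Dict Int Int) (u : Int) : PySem.Dict Int Int :=
  d.insert u (d.getD u 0 + pvInc adjD parentD d u)

def pvF (adjD : PySem.Dict Int (List (Int × Int))) (parentD : PySem.Dict Int Int) (d : PySem.Dict Int Int) (M : List Int) : PySem.Dict Int Int :=
  M.foldl (pvS adjD parentD) d

def pvSnaps (adjD : PySem.Dict Int (List (Int × Int))) (parentD : PySem.Dict Int Int) (d : PySem.Dict Int Int) : List Int → List (Int × List (Int × Int))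
  | [] => []
  | u :: t => (u, (pvS adjD parentD d u).items) :: pvSnaps adjD parentD (pvS adjD parentD d u) t

-- the per-node hypothesis Pre_ gives (independent of the running dict)
def pvGood (adjD : PySem.Dict Int (List (Int × Int))) (parentD : PySem.Dict Int Int) (u : Int) : Prop :=
  ∀ p ∈ adjD.getD u ([] : List (Int × Int)), parentD.get? p.1 = some u → p.1 ≠ u

-- reinserting a present key with its own value leaves the dict unchanged
theorem pv_insert_getD_self (d : PySem.Dict Int Int) (u : Int)
    (hc : d.contains u = true) (hn : d.keys.Nodup) :
    d.insert u (d.getD u 0) = d := by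
  apply PySem.Dict.ext
  rw [PySem.Dict.items_insert_of_contains _ _ hc]
  conv_rhs => rw [← List.map_id d.items]
  apply List.map_congr_left
  intro p hp
  by_cases h : p.1 = u
  · have hmem : (u, p.2) ∈ d.items := by
      have : p = (p.1, p.2) := rfl
      rw [← h]; exact hp
    have h2 := PySem.Dict.getD_of_mem_items d hmem hn 0
    have hp2 : p = (u, p.2) := by rw [← h]
    simp [h, h2, ← hp2]
  · simp [h]

-- A's incremental inner scan equals the single-insert step pvS
theorem pv_stepA_eq (parentD : PySem.Dict Int Int) (u : Int) :
    ∀ (l : List (Int × Int)) (d : PySem.Dict Int Int), d.keys.Nodup → d.contains u = true →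
    (∀ p ∈ l, parentD.get? p.1 = some u → p.1 ≠ u) →
    l.foldl (fun d p => if parentD.get? p.1 == some u then d.insert u (d.getD u 0 + d.getD p.1 0) else d) d
      = d.insert u (d.getD u 0 + ((l.filter (fun q => parentD.get? q.1 == some u)).map (fun q => d.getD q.1 0)).sum) := by
  intro l
  induction l with
  | nil =>
    intro d hn hc _
    simp [pv_insert_getD_self d u hc hn]
  | cons p t ih =>
    intro d hn hc h
    by_cases hcond : (parentD.get? p.1 == some u) = true
    · have hpu : p.1 ≠ u := h p (List.mem_cons_self) (by simpa using hcond)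
      have hkeys : (d.insert u (d.getD u 0 + d.getD p.1 0)).keys = d.keys :=
        PySem.Dict.keys_insert_of_contains _ _ hc
      have hn' : (d.insert u (d.getD u 0 + d.getD p.1 0)).keys.Nodup := by rw [hkeys]; exact hn
      have hc' : (d.insert u (d.getD u 0 + d.getD p.1 0)).contains u = true := by
        rw [PySem.Dict.contains_insert]; simp
      have ht : ∀ q ∈ t, parentD.get? q.1 = some u → q.1 ≠ u := fun q hq => h q (List.mem_cons_of_mem _ hq)
      rw [List.foldl_cons, if_pos hcond, ih _ hn' hc' ht]
      rw [PySem.Dict.insert_insert_self, PySem.Dict.getD_insert_self]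
      simp only [List.filter_cons, hcond, if_true]
      simp only [List.map_cons, List.sum_cons]
      have hmap : (t.filter (fun q => parentD.get? q.1 == some u)).map
          (fun q => (d.insert u (d.getD u 0 + d.getD p.1 0)).getD q.1 0)
          = (t.filter (fun q => parentD.get? q.1 == some u)).map (fun q => d.getD q.1 0) := by
        apply List.map_congr_left
        intro q hq
        have hqf := List.mem_filter.mp hq
        have : q.1 ≠ u := ht q hqf.1 (by simpa using hqf.2)
        exact PySem.Dict.getD_insert_of_ne _ _ _ this
      rw [hmap, ← add_assoc]
    · have hcond' : (parentD.get? p.1 == some u) = false := by simpa using hcond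
      rw [List.foldl_cons, if_neg (by simp [hcond'])]
      simp only [List.filter_cons, hcond']
      simp only [Bool.false_eq_true, if_false]
      exact ih d hn hc (fun q hq => h q (List.mem_cons_of_mem _ hq))

theorem pv_keys_pvS (adjD : PySem.Dict Int (List (Int × Int))) (parentD : PySem.Dict Int Int)
    (d : PySem.Dict Int Int) (u : Int) (hc : d.contains u = true) :
    (pvS adjD parentD d u).keys = d.keys :=
  PySem.Dict.keys_insert_of_contains _ _ hc

theorem pv_keys_pvF (adjD : PySem.Dict Int (List (Int × Int))) (parentD : PySem.Dict Int Int) :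
    ∀ (M : List Int) (d : PySem.Dict Int Int), (∀ u ∈ M, d.contains u = true) →
    (pvF adjD parentD d M).keys = d.keys := by
  intro M
  induction M with
  | nil => intro d _; rfl
  | cons u t ih =>
    intro d h
    have hc := h u (List.mem_cons_self)
    have hk := pv_keys_pvS adjD parentD d u hc
    have ht : ∀ w ∈ t, (pvS adjD parentD d u).contains w = true := by
      intro w hw
      rw [PySem.Dict.contains_iff_mem_keys, hk, ← PySem.Dict.contains_iff_mem_keys]
      exact h w (List.mem_cons_of_mem _ hw)
    show (pvF adjD parentD (pvS adjD parentD d u) t).keys = d.keys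
    rw [ih _ ht, hk]

-- the child-sum is unchanged by its own step (no self-child)
theorem pv_inc_pvS (adjD : PySem.Dict Int (List (Int × Int))) (parentD : PySem.Dict Int Int)
    (d : PySem.Dict Int Int) (u : Int) (hg : pvGood adjD parentD u) :
    pvInc adjD parentD (pvS adjD parentD d u) u = pvInc adjD parentD d u := by
  unfold pvInc
  apply congrArg
  apply List.map_congr_left
  intro q hq
  have hqf := List.mem_filter.mp hq
  have : q.1 ≠ u := hg q hqf.1 (by simpa using hqf.2)
  exact PySem.Dict.getD_insert_of_ne _ _ _ this

-- B's undo step inverts pvS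
theorem pv_undo (adjD : PySem.Dict Int (List (Int × Int))) (parentD : PySem.Dict Int Int)
    (d : PySem.Dict Int Int) (u : Int) (hn : d.keys.Nodup) (hc : d.contains u = true)
    (hg : pvGood adjD parentD u) :
    (pvS adjD parentD d u).insert u
      ((pvS adjD parentD d u).getD u 0 - pvInc adjD parentD (pvS adjD parentD d u) u) = d := by
  rw [pv_inc_pvS adjD parentD d u hg]
  simp only [pvS]
  rw [PySem.Dict.getD_insert_self, PySem.Dict.insert_insert_self]
  have : d.getD u 0 + pvInc adjD parentD d u - pvInc adjD parentD d u = d.getD u 0 := by ring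
  rw [this, pv_insert_getD_self d u hc hn]

theorem pv_pvF_append (adjD : PySem.Dict Int (List (Int × Int))) (parentD : PySem.Dict Int Int)
    (d : PySem.Dict Int Int) (M1 M2 : List Int) :
    pvF adjD parentD d (M1 ++ M2) = pvF adjD parentD (pvF adjD parentD d M1) M2 :=
  List.foldl_append

theorem pv_snaps_append (adjD : PySem.Dict Int (List (Int × Int))) (parentD : PySem.Dict Int Int) :
    ∀ (M1 : List Int) (d : PySem.Dict Int Int) (M2 : List Int),
    pvSnaps adjD parentD d (M1 ++ M2)
      = pvSnaps adjD parentD d M1 ++ pvSnaps adjD parentD (pvF adjD parentD d M1) M2 := by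
  intro M1
  induction M1 with
  | nil => intro d M2; rfl
  | cons u t ih =>
    intro d M2
    show (u, _) :: pvSnaps adjD parentD _ (t ++ M2) = _
    rw [ih]
    rfl

-- A's snapshot loop computes (pvF, pvSnaps)
theorem pv_loopA (adjD : PySem.Dict Int (List (Int × Int))) (parentD : PySem.Dict Int Int) :
    ∀ (M : List Int) (d : PySem.Dict Int Int) (acc : List (Int × List (Int × Int))),
    d.keys.Nodup → (∀ u ∈ M, d.contains u = true ∧ pvGood adjD parentD u) →
    M.foldl (fun (st : PySem.Dict Int Int × List (Int × List (Int × Int))) u =>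
        ((adjD.getD u []).foldl
          (fun d p => if parentD.get? p.1 == some u then d.insert u (d.getD u 0 + d.getD p.1 0) else d) st.1,
         st.2 ++ [(u, ((adjD.getD u []).foldl
          (fun d p => if parentD.get? p.1 == some u then d.insert u (d.getD u 0 + d.getD p.1 0) else d) st.1).items)])) (d, acc)
      = (pvF adjD parentD d M, acc ++ pvSnaps adjD parentD d M) := by
  intro M
  induction M with
  | nil => intro d acc _ _; simp [pvF, pvSnaps]
  | cons u t ih =>
    intro d acc hn h
    obtain ⟨hc, hg⟩ := h u (List.mem_cons_self)
    have hstep : (adjD.getD u []).foldl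
        (fun d p => if parentD.get? p.1 == some u then d.insert u (d.getD u 0 + d.getD p.1 0) else d) d
        = pvS adjD parentD d u := by
      rw [pv_stepA_eq parentD u (adjD.getD u []) d hn hc hg]; rfl
    simp only [List.foldl_cons]
    rw [hstep]
    have hkeys := pv_keys_pvS adjD parentD d u hc
    have hn' : (pvS adjD parentD d u).keys.Nodup := by rw [hkeys]; exact hn
    have ht : ∀ w ∈ t, (pvS adjD parentD d u).contains w = true ∧ pvGood adjD parentD w := by
      intro w hw
      obtain ⟨h1, h2⟩ := h w (List.mem_cons_of_mem _ hw)
      refine ⟨?_, h2⟩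
      rw [PySem.Dict.contains_iff_mem_keys, hkeys, ← PySem.Dict.contains_iff_mem_keys]
      exact h1
    rw [ih (pvS adjD parentD d u) (acc ++ [(u, (pvS adjD parentD d u).items)]) hn' ht]
    simp [pvF, pvSnaps, List.append_assoc]

-- B's undo loop, started from the final state, rebuilds the snapshots newest-first
theorem pv_loopB (adjD : PySem.Dict Int (List (Int × Int))) (parentD : PySem.Dict Int Int) :
    ∀ (L : List Int) (d : PySem.Dict Int Int) (acc : List (Int × List (Int × Int))),
    d.keys.Nodup → (∀ u ∈ L, d.contains u = true ∧ pvGood adjD parentD u) →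
    L.foldl (fun (st : PySem.Dict Int Int × List (Int × List (Int × Int))) u =>
        (st.1.insert u (st.1.getD u 0 - pvInc adjD parentD st.1 u), st.2 ++ [(u, st.1.items)]))
      (pvF adjD parentD d L.reverse, acc)
      = (d, acc ++ (pvSnaps adjD parentD d L.reverse).reverse) := by
  intro L
  induction L with
  | nil => intro d acc _ _; simp [pvF, pvSnaps]
  | cons u t ih =>
    intro d acc hn h
    obtain ⟨hc, hg⟩ := h u (List.mem_cons_self)
    have hct : ∀ w ∈ t.reverse, d.contains w = true := by
      intro w hw
      exact (h w (List.mem_cons_of_mem _ (List.mem_reverse.mp hw))).1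
    have hkf : (pvF adjD parentD d t.reverse).keys = d.keys := pv_keys_pvF adjD parentD t.reverse d hct
    have hnf : (pvF adjD parentD d t.reverse).keys.Nodup := by rw [hkf]; exact hn
    have hcf : (pvF adjD parentD d t.reverse).contains u = true := by
      rw [PySem.Dict.contains_iff_mem_keys, hkf, ← PySem.Dict.contains_iff_mem_keys]
      exact hc
    have hrev : (u :: t).reverse = t.reverse ++ [u] := by simp
    rw [hrev, pv_pvF_append]
    have hF1 : pvF adjD parentD (pvF adjD parentD d t.reverse) [u]
        = pvS adjD parentD (pvF adjD parentD d t.reverse) u := rfl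
    rw [hF1]
    simp only [List.foldl_cons]
    rw [pv_undo adjD parentD (pvF adjD parentD d t.reverse) u hnf hcf hg]
    have ht : ∀ w ∈ t, d.contains w = true ∧ pvGood adjD parentD w :=
      fun w hw => h w (List.mem_cons_of_mem _ hw)
    rw [ih d (acc ++ [(u, (pvS adjD parentD (pvF adjD parentD d t.reverse) u).items)]) hn ht]
    rw [pv_snaps_append adjD parentD t.reverse d [u]]
    show _ = (d, acc ++ (pvSnaps adjD parentD d t.reverse
        ++ [(u, (pvS adjD parentD (pvF adjD parentD d t.reverse) u).items)]).reverse)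
    simp

-- ===== VERDICT (by name: the statement is the Claim_ definition above) =====
theorem subtree_accumulation_snapshots_spec : Claim_equal_subtree_accumulation_snapshots := by
  intro adj parent order _ hpre
  unfold Spec_subtree_accumulation_snapshots
  simp only [subtree_accumulation_snapshots, subtree_accumulation_snapshots_alt]
  have hn0 : (PySem.Dict.ofList adj).keys.Nodup := PySem.Dict.nodup_keys_ofList _
  have hkeys0 : ((PySem.Dict.ofList adj).keys.foldl (fun d u => d.insert u (1 : Int)) PySem.Dict.empty).keys
      = (PySem.Dict.ofList adj).keys := by
    rw [PySem.Dict.keys_foldl_insert]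
    simp [PySem.Set.update_nil_left, PySem.Set.ofList_eq_self_of_nodup _ hn0]
  set adjD := PySem.Dict.ofList adj
  set parentD := PySem.Dict.ofList parent
  set d0 := adjD.keys.foldl (fun d u => d.insert u (1 : Int)) PySem.Dict.empty with hd0
  have hn : d0.keys.Nodup := by rw [hkeys0]; exact hn0
  have hinv : ∀ u ∈ order, d0.contains u = true ∧ pvGood adjD parentD u := by
    intro u hu
    obtain ⟨hcu, hrest⟩ := hpre u hu
    refine ⟨?_, fun p hp hpar => (hrest p hp hpar).2⟩
    rw [PySem.Dict.contains_iff_mem_keys, hkeys0, ← PySem.Dict.contains_iff_mem_keys]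
    exact hcu
  have hinvR : ∀ u ∈ order.reverse, d0.contains u = true ∧ pvGood adjD parentD u :=
    fun u hu => hinv u (List.mem_reverse.mp hu)
  have hA := pv_loopA adjD parentD order.reverse d0 [] hn hinvR
  have hB1 : order.reverse.foldl
      (fun (d : PySem.Dict Int Int) u =>
        d.insert u (d.getD u 0 + (((adjD.getD u []).filter (fun q => parentD.get? q.1 == some u)).map (fun q => d.getD q.1 0)).sum)) d0
      = pvF adjD parentD d0 order.reverse := rfl
  have hB2 := pv_loopB adjD parentD order d0 [] hn hinv
  have hBfold : order.foldl
      (fun (st : PySem.Dict Int Int × List (Int × List (Int × Int))) u =>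
        (st.1.insert u (st.1.getD u 0 - (((adjD.getD u []).filter (fun q => parentD.get? q.1 == some u)).map (fun q => st.1.getD q.1 0)).sum),
         st.2 ++ [(u, st.1.items)])) (pvF adjD parentD d0 order.reverse, [])
      = (d0, [] ++ (pvSnaps adjD parentD d0 order.reverse).reverse) := hB2
  rw [hA, hB1, hBfold]
  simp
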